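-- pv_equiv track=rewrite | github.com/joycebrum/online-judge-problems | UVA/384-slurpys.py | is_slump
-- ===== SOURCE A (Python) =====
-- def is_slump(string, pos):
--     if pos >= len(string): return False, -1
--     if string[pos] != 'D' and string[pos] != 'E':
--         return False, -1
--
--     pos += 1
--     f_count = 0
--     while pos < len(string) and string[pos]== 'F':
--         f_count += 1
--         pos += 1
--     if f_count == 0:
--         return False, -1
--
--     if pos >= len(string): return False, -1
--     if string[pos] == 'G':
--         return True, pos+1
--     return is_slump(string, pos)
-- ===== SOURCE B (Python) =====
-- def is_slump(string, pos):
--     # One-pass state machine over the characters instead of A's recursion: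
--     # 0 = expect 'D'/'E', 1 = expect the first 'F' of a block, 2 = inside an F-run.
--     n = len(string)
--     i = pos
--     state = 0
--     while i < n:
--         c = string[i]
--         if state == 0:
--             if c == 'D' or c == 'E':
--                 state = 1
--             else:
--                 return False, -1
--         elif state == 1:
--             if c == 'F':
--                 state = 2
--             else:
--                 return False, -1
--         else:
--             if c == 'F':
--                 pass
--             elif c == 'G':
--                 return True, i + 1
--             elif c == 'D' or c == 'E':
--                 state = 1
--             else:
--                 return False, -1
--         i += 1
--     return False, -1
-- ===== Notes on version B (the rewrite author's own statement) =====
-- stated objective: alternative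
-- what changed: A's tail recursion with an inner F-counting while-loop is replaced by a single one-pass three-state machine (expect D/E, expect first F, inside F-run) that scans each character exactly once with no recursion and no counter.
import Mathlib
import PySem

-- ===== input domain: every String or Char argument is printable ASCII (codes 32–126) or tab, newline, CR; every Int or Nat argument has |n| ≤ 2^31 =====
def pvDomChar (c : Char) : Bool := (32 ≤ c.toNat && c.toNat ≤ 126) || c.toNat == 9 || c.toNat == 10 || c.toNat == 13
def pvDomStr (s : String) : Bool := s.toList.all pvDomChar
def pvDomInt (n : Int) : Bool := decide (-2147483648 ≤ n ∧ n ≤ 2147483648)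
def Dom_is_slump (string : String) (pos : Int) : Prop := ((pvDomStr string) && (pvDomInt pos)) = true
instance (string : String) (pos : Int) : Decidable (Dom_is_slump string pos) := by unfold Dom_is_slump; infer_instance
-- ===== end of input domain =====

-- B replaces A's recursion-with-inner-while by a single one-pass three-state machine
-- over the characters (objective: alternative decomposition, same cost).
-- The Nat fuel in both ports only makes the recursion structural; it starts at
-- (len - pos).toNat + 1, which is proved sufficient (the index strictly increases and
-- every recursive call happens at an index below the length), so the fuel-0 branch is
-- never reached from is_slump / is_slump_alt.

-- ===== PORT A =====
-- the while loop 'while pos < len(string) and string[pos] == "F": f_count += 1; pos += 1'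
def pvFLoopA (s : List Char) (fuel : Nat) (pos : Int) (f_count : Int) : Int × Int :=
  match fuel with
  | 0 => (f_count, pos)   -- fuel exhausted: unreachable with the fuels used below
  | fuel + 1 =>
    if pos < (s.length : Int) ∧ PySem.List.pyGet? s pos = some 'F' then
      pvFLoopA s fuel (pos + 1) (f_count + 1)
    else (f_count, pos)

def pvIsSlumpA (s : List Char) (fuel : Nat) (pos : Int) : Bool × Int :=
  match fuel with
  | 0 => (false, -1)      -- fuel exhausted: unreachable with the fuels used below
  | fuel + 1 =>
    if (s.length : Int) ≤ pos then (false, -1)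
    else
      match PySem.List.pyGet? s pos with
      | none => (false, -1)   -- IndexError in Python (pos < -len); excluded by Pre_
      | some c =>
        if c ≠ 'D' ∧ c ≠ 'E' then (false, -1)
        else if (pvFLoopA s (((s.length : Int) - (pos + 1)).toNat + 1) (pos + 1) 0).1 = 0 then (false, -1)
        else if (s.length : Int) ≤ (pvFLoopA s (((s.length : Int) - (pos + 1)).toNat + 1) (pos + 1) 0).2 then (false, -1)
        else
          match PySem.List.pyGet? s (pvFLoopA s (((s.length : Int) - (pos + 1)).toNat + 1) (pos + 1) 0).2 with
          | none => (false, -1)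
          | some c' =>
            if c' = 'G' then (true, (pvFLoopA s (((s.length : Int) - (pos + 1)).toNat + 1) (pos + 1) 0).2 + 1)
            else pvIsSlumpA s fuel (pvFLoopA s (((s.length : Int) - (pos + 1)).toNat + 1) (pos + 1) 0).2

def is_slump (string : String) (pos : Int) : Bool × Int :=
  pvIsSlumpA string.toList (((string.toList.length : Int) - pos).toNat + 1) pos

-- ===== PORT B =====
-- state 0: expect 'D'/'E'; state 1: expect the first 'F' of a block; state 2: inside an F-run
def pvIsSlumpB (s : List Char) (fuel : Nat) (i : Int) (state : Int) : Bool × Int :=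
  match fuel with
  | 0 => (false, -1)      -- fuel exhausted: unreachable with the fuel used below
  | fuel + 1 =>
    if i < (s.length : Int) then
      match PySem.List.pyGet? s i with
      | none => (false, -1)   -- IndexError in Python (i < -len); excluded by Pre_
      | some c =>
        if state = 0 then
          (if c = 'D' ∨ c = 'E' then pvIsSlumpB s fuel (i + 1) 1 else (false, -1))
        else if state = 1 then
          (if c = 'F' then pvIsSlumpB s fuel (i + 1) 2 else (false, -1))
        else
          if c = 'F' then pvIsSlumpB s fuel (i + 1) 2
          else if c = 'G' then (true, i + 1)
          else if c = 'D' ∨ c = 'E' then pvIsSlumpB s fuel (i + 1) 1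
          else (false, -1)
    else (false, -1)

def is_slump_alt (string : String) (pos : Int) : Bool × Int :=
  pvIsSlumpB string.toList (((string.toList.length : Int) - pos).toNat + 1) pos 0

-- ===== PRECONDITION & SPEC =====
-- Pre_ excludes only pos < -len(string), where both A and B raise IndexError.
def Pre_is_slump (string : String) (pos : Int) : Prop :=
  -(string.toList.length : Int) ≤ pos
instance (string : String) (pos : Int) : Decidable (Pre_is_slump string pos) := by
  unfold Pre_is_slump; infer_instance

def pvWitness_is_slump : String × Int := ("DFG", 0)

def Spec_is_slump (string : String) (pos : Int) (out : Bool × Int) : Prop := out = is_slump_alt string pos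
instance (string : String) (pos : Int) (out : Bool × Int) : Decidable (Spec_is_slump string pos out) := by unfold Spec_is_slump; infer_instance

-- ===== CLAIM (what is proved, stated in full; the proofs are below) =====
def Claim_equal_is_slump : Prop := ∀ (string : String) (pos : Int), Dom_is_slump string pos → Pre_is_slump string pos → Spec_is_slump string pos (is_slump string pos)

-- ===== LEMMAS AND PROOFS =====

theorem pvFLoopA_stop (s : List Char) (fuel : Nat) (pos f : Int)
    (h : ¬ (pos < (s.length : Int) ∧ PySem.List.pyGet? s pos = some 'F')) :
    pvFLoopA s (fuel + 1) pos f = (f, pos) := by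
  rw [pvFLoopA]; simp [h]

theorem pvFLoopA_step (s : List Char) (fuel : Nat) (pos f : Int)
    (h1 : pos < (s.length : Int)) (hc : PySem.List.pyGet? s pos = some 'F') :
    pvFLoopA s (fuel + 1) pos f = pvFLoopA s fuel (pos + 1) (f + 1) := by
  rw [pvFLoopA]; simp [h1, hc]

theorem pvFLoopA_snd_ge (s : List Char) : ∀ (fuel : Nat) (pos f : Int),
    pos ≤ (pvFLoopA s fuel pos f).2 := by
  intro fuel
  induction fuel with
  | zero => intro pos f; simp [pvFLoopA]
  | succ fuel ih =>
    intro pos f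
    by_cases h : pos < (s.length : Int) ∧ PySem.List.pyGet? s pos = some 'F'
    · rw [pvFLoopA_step s fuel pos f h.1 h.2]
      have := ih (pos + 1) (f + 1); omega
    · rw [pvFLoopA_stop s fuel pos f h]

theorem pvFLoopA_fst_ge (s : List Char) : ∀ (fuel : Nat) (pos f : Int),
    f ≤ (pvFLoopA s fuel pos f).1 := by
  intro fuel
  induction fuel with
  | zero => intro pos f; simp [pvFLoopA]
  | succ fuel ih =>
    intro pos f
    by_cases h : pos < (s.length : Int) ∧ PySem.List.pyGet? s pos = some 'F'
    · rw [pvFLoopA_step s fuel pos f h.1 h.2]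
      have := ih (pos + 1) (f + 1); omega
    · rw [pvFLoopA_stop s fuel pos f h]

-- the final position of the F-loop depends on neither the running count nor (given enough) the fuel
theorem pvFLoopA_snd_indep (s : List Char) : ∀ (k : Nat) (pos f g : Int),
    ((s.length : Int) - pos).toNat < k →
    (pvFLoopA s k pos f).2 = (pvFLoopA s k pos g).2 := by
  intro k
  induction k with
  | zero => intro pos f g hk; omega
  | succ k ih =>
    intro pos f g hk
    by_cases h : pos < (s.length : Int) ∧ PySem.List.pyGet? s pos = some 'F'
    · rw [pvFLoopA_step s k pos f h.1 h.2, pvFLoopA_step s k pos g h.1 h.2]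
      exact ih (pos + 1) (f + 1) (g + 1) (by omega)
    · rw [pvFLoopA_stop s k pos f h, pvFLoopA_stop s k pos g h]

-- abbreviation for the canonical F-loop call A makes after a D/E at p - 1
def pvFL (s : List Char) (p : Int) : Int × Int :=
  pvFLoopA s (((s.length : Int) - p).toNat + 1) p 0

-- one unfolded step of A's port, with fuel still above the remaining distance
theorem pvIsSlumpA_unfold (s : List Char) (fuel : Nat) (pos : Int) :
    pvIsSlumpA s (fuel + 1) pos =
      (if (s.length : Int) ≤ pos then (false, -1)
      else
        match PySem.List.pyGet? s pos with
        | none => (false, -1)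
        | some c =>
          if c ≠ 'D' ∧ c ≠ 'E' then (false, -1)
          else if (pvFL s (pos + 1)).1 = 0 then (false, -1)
          else if (s.length : Int) ≤ (pvFL s (pos + 1)).2 then (false, -1)
          else
            match PySem.List.pyGet? s (pvFL s (pos + 1)).2 with
            | none => (false, -1)
            | some c' =>
              if c' = 'G' then (true, (pvFL s (pos + 1)).2 + 1)
              else pvIsSlumpA s fuel (pvFL s (pos + 1)).2) := by
  rw [pvIsSlumpA, pvFL]

-- fuel irrelevance for A's port
theorem pvIsSlumpA_irrel (s : List Char) : ∀ (k k' : Nat) (pos : Int),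
    ((s.length : Int) - pos).toNat < k → ((s.length : Int) - pos).toNat < k' →
    pvIsSlumpA s k pos = pvIsSlumpA s k' pos := by
  intro k
  induction k with
  | zero => intro k' pos hk; omega
  | succ k ih =>
    intro k' pos hk hk'
    match k', hk' with
    | k' + 1, hk' =>
      rw [pvIsSlumpA_unfold s k pos, pvIsSlumpA_unfold s k' pos]
      by_cases hge : (s.length : Int) ≤ pos
      · simp [hge]
      · simp only [if_neg hge]
        rcases hc : PySem.List.pyGet? s pos with _ | c
        · rfl
        · have hsnd := pvFLoopA_snd_ge s (((s.length : Int) - (pos + 1)).toNat + 1) (pos + 1) 0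
          by_cases h2 : (s.length : Int) ≤ (pvFL s (pos + 1)).2
          · simp [h2]
          · simp only [if_neg h2]
            have hrec := ih k' (pvFL s (pos + 1)).2
              (by unfold pvFL at *; omega) (by unfold pvFL at *; omega)
            rcases PySem.List.pyGet? s (pvFL s (pos + 1)).2 with _ | c' <;> simp [hrec]

-- A's control state after matching 'D'/'E': the F-loop runs from p, then the tail of A's body
def pvTailA (s : List Char) (p : Int) : Bool × Int :=
  if (s.length : Int) ≤ (pvFL s p).2 then (false, -1)
  else
    match PySem.List.pyGet? s (pvFL s p).2 with
    | none => (false, -1)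
    | some c =>
      if c = 'G' then (true, (pvFL s p).2 + 1)
      else pvIsSlumpA s (((s.length : Int) - (pvFL s p).2).toNat + 1) (pvFL s p).2

def pvPostA (s : List Char) (p : Int) : Bool × Int :=
  if (pvFL s p).1 = 0 then (false, -1) else pvTailA s p

-- canonical-fuel A, in the D/E case, is pvPostA of the next index
theorem pvIsSlumpA_DE (s : List Char) (pos : Int) (c : Char)
    (h1 : pos < (s.length : Int)) (hc : PySem.List.pyGet? s pos = some c)
    (hDE : c = 'D' ∨ c = 'E') :
    pvIsSlumpA s (((s.length : Int) - pos).toNat + 1) pos = pvPostA s (pos + 1) := by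
  rw [pvIsSlumpA_unfold s (((s.length : Int) - pos).toNat) pos]
  have hne : ¬ (c ≠ 'D' ∧ c ≠ 'E') := by rcases hDE with h | h <;> simp [h]
  simp only [show ¬ ((s.length : Int) ≤ pos) by omega, if_false, hc, hne, pvPostA, pvTailA]
  by_cases hz : (pvFL s (pos + 1)).1 = 0
  · simp [hz]
  · simp only [if_neg hz]
    by_cases h2 : (s.length : Int) ≤ (pvFL s (pos + 1)).2
    · simp [h2]
    · simp only [if_neg h2]
      have hsnd := pvFLoopA_snd_ge s (((s.length : Int) - (pos + 1)).toNat + 1) (pos + 1) 0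
      have hrec := pvIsSlumpA_irrel s (((s.length : Int) - pos).toNat)
        (((s.length : Int) - (pvFL s (pos + 1)).2).toNat + 1) (pvFL s (pos + 1)).2
        (by unfold pvFL at *; omega) (by omega)
      rcases PySem.List.pyGet? s (pvFL s (pos + 1)).2 with _ | c' <;> simp [hrec]

-- one step of the canonical F-loop
theorem pvFL_step (s : List Char) (p : Int)
    (h1 : p < (s.length : Int)) (hc : PySem.List.pyGet? s p = some 'F') :
    (pvFL s p).2 = (pvFL s (p + 1)).2 ∧ (pvFL s p).1 ≠ 0 := by
  have heq : ((s.length : Int) - p).toNat = ((s.length : Int) - (p + 1)).toNat + 1 := by omega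
  constructor
  · rw [pvFL, heq, pvFLoopA_step s (((s.length : Int) - (p + 1)).toNat + 1) p 0 h1 hc]
    exact pvFLoopA_snd_indep s (((s.length : Int) - (p + 1)).toNat + 1) (p + 1) 1 0 (by omega)
  · rw [pvFL, heq, pvFLoopA_step s (((s.length : Int) - (p + 1)).toNat + 1) p 0 h1 hc]
    have := pvFLoopA_fst_ge s (((s.length : Int) - (p + 1)).toNat + 1) (p + 1) (0 + 1)
    omega

-- the canonical F-loop stopped immediately
theorem pvFL_stop (s : List Char) (p : Int)
    (h : ¬ (p < (s.length : Int) ∧ PySem.List.pyGet? s p = some 'F')) :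
    pvFL s p = (0, p) :=
  pvFLoopA_stop s (((s.length : Int) - p).toNat) p 0 h

-- if s[p] = 'F' the tail state is unchanged by consuming it
theorem pvTailA_F (s : List Char) (p : Int)
    (h1 : p < (s.length : Int)) (hc : PySem.List.pyGet? s p = some 'F') :
    pvTailA s p = pvTailA s (p + 1) := by
  have hsnd := (pvFL_step s p h1 hc).1
  simp only [pvTailA, hsnd]

-- B with canonical fuel, at each of its three states, against the matching stage of A
theorem pvCombo (s : List Char) : ∀ (n : Nat) (pos : Int),
    ((s.length : Int) - pos).toNat ≤ n → -(s.length : Int) ≤ pos →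
    (pvIsSlumpB s (((s.length : Int) - pos).toNat + 1) pos 0
       = pvIsSlumpA s (((s.length : Int) - pos).toNat + 1) pos ∧
     pvIsSlumpB s (((s.length : Int) - pos).toNat + 1) pos 1 = pvPostA s pos ∧
     pvIsSlumpB s (((s.length : Int) - pos).toNat + 1) pos 2 = pvTailA s pos) := by
  intro n
  induction n with
  | zero =>
    intro pos hn hlo
    have hge : (s.length : Int) ≤ pos := by omega
    have hB : ∀ st : Int, pvIsSlumpB s (((s.length : Int) - pos).toNat + 1) pos st = (false, -1) := by
      intro st; rw [pvIsSlumpB]; simp [show ¬ (pos < (s.length : Int)) by omega]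
    have hFL : pvFL s pos = (0, pos) := pvFL_stop s pos (by omega)
    refine ⟨?_, ?_, ?_⟩
    · rw [hB, pvIsSlumpA_unfold s (((s.length : Int) - pos).toNat) pos]; simp [hge]
    · rw [hB]; simp [pvPostA, hFL]
    · rw [hB]; simp [pvTailA, hFL, hge]
  | succ n ih =>
    intro pos hn hlo
    by_cases hge : (s.length : Int) ≤ pos
    · have hB : ∀ st : Int, pvIsSlumpB s (((s.length : Int) - pos).toNat + 1) pos st = (false, -1) := by
        intro st; rw [pvIsSlumpB]; simp [show ¬ (pos < (s.length : Int)) by omega]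
      have hFL : pvFL s pos = (0, pos) := pvFL_stop s pos (by omega)
      refine ⟨?_, ?_, ?_⟩
      · rw [hB, pvIsSlumpA_unfold s (((s.length : Int) - pos).toNat) pos]; simp [hge]
      · rw [hB]; simp [pvPostA, hFL]
      · rw [hB]; simp [pvTailA, hFL, hge]
    · have hlt : pos < (s.length : Int) := by omega
      obtain ⟨c, hc⟩ : ∃ c, PySem.List.pyGet? s pos = some c := by
        rcases h : PySem.List.pyGet? s pos with _ | c
        · rw [PySem.List.pyGet?_eq_none_iff] at h
          exact absurd (by constructor <;> omega) h
        · exact ⟨c, rfl⟩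
      have hcanon : ((s.length : Int) - pos).toNat = ((s.length : Int) - (pos + 1)).toNat + 1 := by
        omega
      have ihm := ih (pos + 1) (by omega) (by omega)
      -- one unfolded step of B at each state (the recursive fuel is again canonical)
      have hBstep : ∀ st : Int, pvIsSlumpB s (((s.length : Int) - pos).toNat + 1) pos st =
          (if st = 0 then
            (if c = 'D' ∨ c = 'E' then
              pvIsSlumpB s (((s.length : Int) - (pos + 1)).toNat + 1) (pos + 1) 1 else (false, -1))
          else if st = 1 then
            (if c = 'F' then
              pvIsSlumpB s (((s.length : Int) - (pos + 1)).toNat + 1) (pos + 1) 2 else (false, -1))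
          else
            if c = 'F' then pvIsSlumpB s (((s.length : Int) - (pos + 1)).toNat + 1) (pos + 1) 2
            else if c = 'G' then (true, pos + 1)
            else if c = 'D' ∨ c = 'E' then
              pvIsSlumpB s (((s.length : Int) - (pos + 1)).toNat + 1) (pos + 1) 1
            else (false, -1)) := by
        intro st; rw [hcanon, pvIsSlumpB]; simp [hlt, hc]
      refine ⟨?_, ?_, ?_⟩
      · -- state 0 vs A
        rw [hBstep]; simp only [if_true]
        by_cases hDE : c = 'D' ∨ c = 'E'
        · rw [if_pos hDE, ihm.2.1, pvIsSlumpA_DE s pos c hlt hc hDE]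
        · rw [if_neg hDE, pvIsSlumpA_unfold s (((s.length : Int) - pos).toNat) pos]
          have hne : c ≠ 'D' ∧ c ≠ 'E' := by
            constructor <;> intro h <;> exact hDE (by simp [h])
          simp [hge, hc, hne]
      · -- state 1 vs pvPostA
        rw [hBstep]; norm_num
        by_cases hF : c = 'F'
        · subst hF
          rw [if_pos rfl, ihm.2.2, ← pvTailA_F s pos hlt hc]
          simp [pvPostA, (pvFL_step s pos hlt hc).2]
        · rw [if_neg hF]
          have hFL : pvFL s pos = (0, pos) :=
            pvFL_stop s pos (by intro h; have h2 := h.2; rw [hc] at h2; exact hF (Option.some.inj h2))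
          simp [pvPostA, hFL]
      · -- state 2 vs pvTailA
        rw [hBstep]; norm_num
        by_cases hF : c = 'F'
        · subst hF
          rw [if_pos rfl, ihm.2.2, ← pvTailA_F s pos hlt hc]
        · have hFL : pvFL s pos = (0, pos) :=
            pvFL_stop s pos (by intro h; have h2 := h.2; rw [hc] at h2; exact hF (Option.some.inj h2))
          rw [if_neg hF]
          by_cases hG : c = 'G'
          · subst hG
            simp [pvTailA, hFL, hc, hge]
          · rw [if_neg hG]
            have htail : pvTailA s pos = pvIsSlumpA s (((s.length : Int) - pos).toNat + 1) pos := by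
              simp [pvTailA, hFL, hc, hG, hge]
            by_cases hDE : c = 'D' ∨ c = 'E'
            · rw [if_pos hDE, ihm.2.1, htail, pvIsSlumpA_DE s pos c hlt hc hDE]
            · rw [if_neg hDE, htail,
                pvIsSlumpA_unfold s (((s.length : Int) - pos).toNat) pos]
              have hne : c ≠ 'D' ∧ c ≠ 'E' := by
                constructor <;> intro h <;> exact hDE (by simp [h])
              simp [hge, hc, hne]

-- ===== VERDICT (by name: the statement is the Claim_ definition above) =====
theorem is_slump_spec : Claim_equal_is_slump := by
  intro string pos _ hpre
  unfold Spec_is_slump is_slump is_slump_alt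
  exact (pvCombo string.toList ((string.toList.length : Int) - pos).toNat pos le_rfl hpre).1.symm
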